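-- pv_equiv track=rewrite | github.com/golubitsky/explorations | dsa/advent-of-code/2023/day_18.py | count_empties_at_edge
-- ===== SOURCE A (Python) =====
-- from collections import deque
--
-- def min_max(holes):
--     max_y = max([y for y, x in holes])
--     max_x = max([x for y, x in holes])
--     min_y = min([y for y, x in holes])
--     min_x = min([x for y, x in holes])
--
--     return [min_y, max_y, min_x, max_x]
--
-- def count_empties_at_edge(holes):
--     min_y, max_y, min_x, max_x = min_max(holes)
--     seen_empties = set()
--     found_neighbors = set()
--
--     def in_bounds(pos):
--         y, x = pos
--         return y >= min_y and y <= max_y and x >= min_x and x <= max_x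
--
--     def empty_neighbors(pos):
--         result = []
--
--         for dy, dx in [(0, 1), (0, -1), (-1, 0), (1, 0)]:
--             y, x = pos
--             adj = (y + dy, x + dx)
--             if adj not in holes and in_bounds(adj):
--                 result.append(adj)
--
--         return result
--
--     def find_adjacent_empties(pos):
--         q = deque([pos])
--         while q:
--             pos = q.popleft()
--             if pos not in seen_empties:
--                 seen_empties.add(pos)
--
--             for neighbor in empty_neighbors(pos):
--                 if neighbor not in found_neighbors:
--                     found_neighbors.add(neighbor)
--                     q.append(neighbor)
--
--     for x in range(min_x, max_x + 1):
--         for pos in [(min_y, x), (max_y, x)]: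
--             if pos not in seen_empties and pos not in holes:
--                 find_adjacent_empties(pos)
--
--     for y in range(min_y, max_y + 1):
--         for pos in [(y, min_x), (y, max_x)]:
--             if pos not in seen_empties and pos not in holes:
--                 find_adjacent_empties(pos)
--
--     return len(seen_empties)
-- ===== SOURCE B (Python) =====
-- def count_empties_at_edge(holes):
--     min_y = min(y for y, x in holes)
--     max_y = max(y for y, x in holes)
--     min_x = min(x for y, x in holes)
--     max_x = max(x for y, x in holes)
--     hole_set = set(holes)
--
--     cells = [(y, x)
--              for y in range(min_y, max_y + 1)
--              for x in range(min_x, max_x + 1)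
--              if (y, x) not in hole_set]
--     index = {c: i for i, c in enumerate(cells)}
--     parent = list(range(len(cells)))
--
--     def find(i):
--         while parent[i] != i:
--             i = parent[i]
--         return i
--
--     for i, (y, x) in enumerate(cells):
--         for nb in ((y, x + 1), (y + 1, x)):
--             j = index.get(nb)
--             if j is not None:
--                 ra, rb = find(i), find(j)
--                 if ra != rb:
--                     parent[max(ra, rb)] = min(ra, rb)
--
--     edge_roots = {find(i) for i, (y, x) in enumerate(cells)
--                   if y == min_y or y == max_y or x == min_x or x == max_x}
--     return sum(1 for i in range(len(cells)) if find(i) in edge_roots)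
-- ===== Notes on version B (the rewrite author's own statement) =====
-- stated objective: alternative
-- what changed: A repeatedly runs a deque-based BFS flood fill from each boundary cell; B never searches: it enumerates the free cells of the bounding box, builds a union-find (disjoint-set forest, union by smaller index) keyed by cell index, unions each cell with its right and down free neighbors in one pass, marks the roots of boundary cells, and counts cells whose root is marked.
import Mathlib
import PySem

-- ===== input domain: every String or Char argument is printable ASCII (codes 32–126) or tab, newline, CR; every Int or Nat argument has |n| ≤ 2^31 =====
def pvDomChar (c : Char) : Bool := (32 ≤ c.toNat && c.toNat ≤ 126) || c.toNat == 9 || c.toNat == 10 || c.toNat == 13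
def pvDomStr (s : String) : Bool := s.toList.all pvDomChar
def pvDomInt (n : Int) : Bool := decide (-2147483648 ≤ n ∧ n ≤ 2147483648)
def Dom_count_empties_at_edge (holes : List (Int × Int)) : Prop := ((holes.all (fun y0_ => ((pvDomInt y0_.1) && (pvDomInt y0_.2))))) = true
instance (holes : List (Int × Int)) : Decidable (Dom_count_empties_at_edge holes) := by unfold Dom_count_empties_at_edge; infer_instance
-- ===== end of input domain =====

-- A floods the free cells of the bounding box from its border with repeated deque BFS runs;
-- B instead builds a union-find over the free cells (one union pass over right/down neighbors)
-- and counts the cells whose component root is marked as touching the border (alternative).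
-- Python's set()/dict are consumed only through membership/lookup, never through iteration order.

-- ===== PORT A =====

-- min_max: Python max()/min() of a possibly empty list raise ValueError (= none); excluded by Pre_,
-- the .getD 0 default is never reached on admitted inputs.
def pvA_minMax (holes : List (Int × Int)) : Int × Int × Int × Int :=
  let max_y := (PySem.List.max? (holes.map (fun p => p.1)) (fun v => v)).getD 0
  let max_x := (PySem.List.max? (holes.map (fun p => p.2)) (fun v => v)).getD 0
  let min_y := (PySem.List.min? (holes.map (fun p => p.1)) (fun v => v)).getD 0
  let min_x := (PySem.List.min? (holes.map (fun p => p.2)) (fun v => v)).getD 0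
  (min_y, max_y, min_x, max_x)

def pvA_inBounds (mny mxy mnx mxx : Int) (pos : Int × Int) : Bool :=
  decide (pos.1 ≥ mny ∧ pos.1 ≤ mxy ∧ pos.2 ≥ mnx ∧ pos.2 ≤ mxx)

def pvA_emptyNeighbors (holes : List (Int × Int)) (mny mxy mnx mxx : Int)
    (pos : Int × Int) : List (Int × Int) :=
  [((0 : Int), (1 : Int)), (0, -1), (-1, 0), (1, 0)].foldl
    (fun result d =>
      let adj := (pos.1 + d.1, pos.2 + d.2)
      if adj ∉ holes ∧ pvA_inBounds mny mxy mnx mxx adj = true then result ++ [adj]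
      else result) []

-- deque as a two-list FIFO queue: popleft takes from `front`, append conses onto `back`
def pvA_pop (front back : List (Int × Int)) :
    Option ((Int × Int) × List (Int × Int) × List (Int × Int)) :=
  match front with
  | pos :: f => some (pos, f, back)
  | [] =>
    match back.reverse with
    | pos :: f => some (pos, f, [])
    | [] => none

-- the inner 'for neighbor in empty_neighbors(pos)' loop of find_adjacent_empties
def pvA_pushNeighbors (ns : List (Int × Int)) (back : List (Int × Int))
    (found : Std.HashSet (Int × Int)) : List (Int × Int) × Std.HashSet (Int × Int) :=
  ns.foldl (fun st n => if n ∈ st.2 then st else (n :: st.1, st.2.insert n)) (back, found)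

-- number of cells of the bounding box; fuel bound for A's while loop (proved sufficient below)
def pvBoxN (mny mxy mnx mxx : Int) : Nat := ((mxy - mny + 1) * (mxx - mnx + 1)).toNat

-- the 'while q:' BFS loop of find_adjacent_empties; one fuel unit per iteration
def pvA_bfs (holes : List (Int × Int)) (mny mxy mnx mxx : Int) :
    Nat → List (Int × Int) → List (Int × Int) →
    Std.HashSet (Int × Int) → Std.HashSet (Int × Int) →
    Std.HashSet (Int × Int) × Std.HashSet (Int × Int)
  | 0, _, _, seen, found => (seen, found)
  | fuel + 1, front, back, seen, found =>
    match pvA_pop front back with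
    | none => (seen, found)
    | some (pos, f', b') =>
      pvA_bfs holes mny mxy mnx mxx fuel f'
        (pvA_pushNeighbors (pvA_emptyNeighbors holes mny mxy mnx mxx pos) b' found).1
        (if pos ∈ seen then seen else seen.insert pos)
        (pvA_pushNeighbors (pvA_emptyNeighbors holes mny mxy mnx mxx pos) b' found).2

-- one candidate position of the outer boundary loops
def pvA_visit (holes : List (Int × Int)) (mny mxy mnx mxx : Int)
    (st : Std.HashSet (Int × Int) × Std.HashSet (Int × Int)) (pos : Int × Int) :
    Std.HashSet (Int × Int) × Std.HashSet (Int × Int) :=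
  if pos ∉ st.1 ∧ pos ∉ holes then
    pvA_bfs holes mny mxy mnx mxx (pvBoxN mny mxy mnx mxx + 2) [pos] [] st.1 st.2
  else st

-- the two boundary 'for' loops; state = (seen_empties, found_neighbors)
def pvA_state (holes : List (Int × Int)) (mny mxy mnx mxx : Int) :
    Std.HashSet (Int × Int) × Std.HashSet (Int × Int) :=
  let st1 := (PySem.List.pyRange mnx (mxx + 1) 1).foldl
      (fun st x => [(mny, x), (mxy, x)].foldl (pvA_visit holes mny mxy mnx mxx) st) (∅, ∅)
  (PySem.List.pyRange mny (mxy + 1) 1).foldl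
      (fun st y => [(y, mnx), (y, mxx)].foldl (pvA_visit holes mny mxy mnx mxx) st) st1

def count_empties_at_edge (holes : List (Int × Int)) : Int :=
  let mm := pvA_minMax holes
  (((pvA_state holes mm.1 mm.2.1 mm.2.2.1 mm.2.2.2).1).size : Int)

-- ===== PORT B =====

-- the list comprehension building `cells`: free cells of the bounding box, row-major
def pvB_cellsOf (blocked : PySem.Set (Int × Int)) (a b c d : Int) : List (Int × Int) :=
  (PySem.List.pyRange a (b + 1) 1).flatMap (fun y =>
    (PySem.List.pyRange c (d + 1) 1).filterMap (fun x =>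
      if PySem.Set.contains blocked (y, x) then none else some (y, x)))

-- the dict comprehension {c: i for i, c in enumerate(cells)}; a Python dict consumed
-- only through .get lookups, modelled by a hash map
def pvB_index (cells : List (Int × Int)) : Std.HashMap (Int × Int) Nat :=
  cells.zipIdx.foldl (fun d ci => d.insert ci.1 ci.2) ∅

-- find: python's unbounded 'while parent[i] != i' loop; called with fuel = len(parent),
-- which suffices because every parent link strictly decreases the index (see pvFind_spec)
def pvFind (P : Array Nat) : Nat → Nat → Nat
  | 0, i => i
  | f + 1, i => if P.getD i 0 = i then i else pvFind P f (P.getD i 0)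

-- the body 'ra, rb = find(i), find(j); if ra != rb: parent[max(ra, rb)] = min(ra, rb)'
def pvUnion (P : Array Nat) (i j : Nat) : Array Nat :=
  let ra := pvFind P P.size i
  let rb := pvFind P P.size j
  -- parent[max] = min: the index is always in bounds (roots are < len(parent))
  if ra = rb then P else P.setIfInBounds (max ra rb) (min ra rb)

-- the inner 'for nb in ((y, x + 1), (y + 1, x))' loop of the union pass
def pvB_step (idx : Std.HashMap (Int × Int) Nat) (P : Array Nat)
    (ci : (Int × Int) × Nat) : Array Nat :=
  [(ci.1.1, ci.1.2 + 1), (ci.1.1 + 1, ci.1.2)].foldl (fun P nb =>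
    match idx[nb]? with
    | none => P
    | some j => pvUnion P ci.2 j) P

-- the set comprehension building edge_roots
def pvB_edgeRoots (a b c d : Int) (P : Array Nat) (cells : List (Int × Int)) : PySem.Set Nat :=
  cells.zipIdx.foldl (fun s ci =>
    if ci.1.1 = a ∨ ci.1.1 = b ∨ ci.1.2 = c ∨ ci.1.2 = d
    then PySem.Set.add s (pvFind P P.size ci.2) else s) PySem.Set.empty

def count_empties_at_edge_alt (holes : List (Int × Int)) : Int :=
  -- min()/max() of an empty generator raise ValueError (= none); excluded by Pre_
  let mny := (PySem.List.min? (holes.map (fun p => p.1)) (fun v => v)).getD 0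
  let mxy := (PySem.List.max? (holes.map (fun p => p.1)) (fun v => v)).getD 0
  let mnx := (PySem.List.min? (holes.map (fun p => p.2)) (fun v => v)).getD 0
  let mxx := (PySem.List.max? (holes.map (fun p => p.2)) (fun v => v)).getD 0
  let hset := PySem.Set.ofList holes
  let cells := pvB_cellsOf hset mny mxy mnx mxx
  let idx := pvB_index cells
  let P0 := Array.range cells.length        -- parent = list(range(len(cells)))
  let P := cells.zipIdx.foldl (pvB_step idx) P0
  let roots := pvB_edgeRoots mny mxy mnx mxx P cells
  (PySem.List.pyRange 0 (cells.length : Int) 1).foldl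
    (fun acc i => if PySem.Set.contains roots (pvFind P P.size i.toNat) then acc + 1 else acc)
    0

-- ===== PRECONDITION & SPEC =====
-- Pre_ excludes only the empty list, on which Python A (and B) raise ValueError in max()/min().
def Pre_count_empties_at_edge (holes : List (Int × Int)) : Prop := holes ≠ []
instance (holes : List (Int × Int)) : Decidable (Pre_count_empties_at_edge holes) := by
  unfold Pre_count_empties_at_edge; infer_instance

def pvWitness_count_empties_at_edge : (List (Int × Int)) := [((0 : Int), (0 : Int))]

def Spec_count_empties_at_edge (holes : List (Int × Int)) (out : Int) : Prop :=
  out = count_empties_at_edge_alt holes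
instance (holes : List (Int × Int)) (out : Int) :
    Decidable (Spec_count_empties_at_edge holes out) := by
  unfold Spec_count_empties_at_edge; infer_instance

-- ===== CLAIM (what is proved, stated in full; the proofs are below) =====
def Claim_equal_count_empties_at_edge : Prop :=
  ∀ (holes : List (Int × Int)), Dom_count_empties_at_edge holes →
    Pre_count_empties_at_edge holes →
    Spec_count_empties_at_edge holes (count_empties_at_edge holes)

-- ===== LEMMAS AND PROOFS =====

-- a cell is "free": not a hole and inside the bounding box
def pvFreeP (H : List (Int × Int)) (a b c d : Int) (p : Int × Int) : Prop :=
  p ∉ H ∧ a ≤ p.1 ∧ p.1 ≤ b ∧ c ≤ p.2 ∧ p.2 ≤ d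

def pvNbrs (p : Int × Int) : List (Int × Int) :=
  [(p.1, p.2 + 1), (p.1, p.2 - 1), (p.1 - 1, p.2), (p.1 + 1, p.2)]

-- free cells 4-connected (through free cells) to a free cell on the box boundary
inductive pvReach (H : List (Int × Int)) (a b c d : Int) : (Int × Int) → Prop where
  | base (p : Int × Int) : pvFreeP H a b c d p →
      (p.1 = a ∨ p.1 = b ∨ p.2 = c ∨ p.2 = d) → pvReach H a b c d p
  | step (p n : Int × Int) : pvReach H a b c d p → n ∈ pvNbrs p →
      pvFreeP H a b c d n → pvReach H a b c d n

lemma pvReach_free {H : List (Int × Int)} {a b c d : Int} {p : Int × Int}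
    (h : pvReach H a b c d p) : pvFreeP H a b c d p := by
  cases h with
  | base _ hf _ => exact hf
  | step _ _ _ _ hf => exact hf

-- any start-containing, neighbor-closed set contains every reachable cell
lemma pvReach_mem_of_closed {H : List (Int × Int)} {a b c d : Int}
    {S : Std.HashSet (Int × Int)}
    (hstart : ∀ p, pvFreeP H a b c d p → (p.1 = a ∨ p.1 = b ∨ p.2 = c ∨ p.2 = d) → p ∈ S)
    (hclosed : ∀ p ∈ S, ∀ n ∈ pvNbrs p, pvFreeP H a b c d n → n ∈ S) :
    ∀ p, pvReach H a b c d p → p ∈ S := by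
  intro p h
  induction h with
  | base p hf hb => exact hstart p hf hb
  | step p n _ hn hf ih => exact hclosed p ih n hn hf

lemma pv_hs_nodup_toList (m : Std.HashSet (Int × Int)) : m.toList.Nodup := by
  have h := Std.HashSet.distinct_toList (m := m)
  exact h.imp (fun hb => by simpa using hb)

lemma pv_mem_insert (m : Std.HashSet (Int × Int)) (x y : Int × Int) :
    y ∈ m.insert x ↔ y ∈ m ∨ y = x := by
  rw [Std.HashSet.mem_insert]
  constructor
  · rintro (h | h)
    · exact Or.inr (beq_iff_eq.mp h).symm
    · exact Or.inl h
  · rintro (h | rfl)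
    · exact Or.inr h
    · exact Or.inl (beq_self_eq_true _)

lemma pv_mem_condInsert (m : Std.HashSet (Int × Int)) (x y : Int × Int) :
    y ∈ (if x ∈ m then m else m.insert x) ↔ y ∈ m ∨ y = x := by
  split_ifs with h
  · constructor
    · exact Or.inl
    · rintro (hy | rfl)
      · exact hy
      · exact h
  · exact pv_mem_insert m x y

lemma pv_size_insert_of_not_mem {m : Std.HashSet (Int × Int)} {x : Int × Int}
    (h : x ∉ m) : (m.insert x).size = m.size + 1 := by
  rw [Std.HashSet.size_insert, if_neg h]

lemma pv_length_le_box (a b c d : Int) (l : List (Int × Int)) (hnd : l.Nodup)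
    (hbox : ∀ p ∈ l, a ≤ p.1 ∧ p.1 ≤ b ∧ c ≤ p.2 ∧ p.2 ≤ d) :
    l.length ≤ pvBoxN a b c d := by
  have hsub : l.toFinset ⊆ Finset.Icc a b ×ˢ Finset.Icc c d := by
    intro p hp
    rcases hbox p (List.mem_toFinset.mp hp) with ⟨h1, h2, h3, h4⟩
    simp [Finset.mem_product, Finset.mem_Icc]
    omega
  have hc := Finset.card_le_card hsub
  rw [List.toFinset_card_of_nodup hnd] at hc
  have hcard : (Finset.Icc a b ×ˢ Finset.Icc c d).card = (b + 1 - a).toNat * (d + 1 - c).toNat := by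
    rw [Finset.card_product, Int.card_Icc, Int.card_Icc]
  rw [hcard] at hc
  have h1 : (b + 1 - a).toNat * (d + 1 - c).toNat ≤ pvBoxN a b c d := by
    unfold pvBoxN
    by_cases h : 0 ≤ (b - a + 1)
    · by_cases h' : 0 ≤ (d - c + 1)
      · rw [Int.toNat_mul h h']
        have e1 : (b + 1 - a).toNat = (b - a + 1).toNat := by omega
        have e2 : (d + 1 - c).toNat = (d - c + 1).toNat := by omega
        rw [e1, e2]
      · have : (d + 1 - c).toNat = 0 := by omega
        simp [this]
    · have : (b + 1 - a).toNat = 0 := by omega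
      simp [this]
  omega

lemma pv_hs_size_le_box (a b c d : Int) (m : Std.HashSet (Int × Int))
    (hbox : ∀ p ∈ m, a ≤ p.1 ∧ p.1 ≤ b ∧ c ≤ p.2 ∧ p.2 ≤ d) :
    m.size ≤ pvBoxN a b c d := by
  rw [← Std.HashSet.length_toList]
  exact pv_length_le_box a b c d m.toList (pv_hs_nodup_toList m)
    (fun p hp => hbox p (Std.HashSet.mem_toList.mp hp))

lemma pv_emptyNb_fold_mem (H : List (Int × Int)) (a b c d : Int) (pos q : Int × Int) :
    ∀ (ds : List (Int × Int)) (acc : List (Int × Int)),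
    (q ∈ ds.foldl (fun result dd =>
        let adj := (pos.1 + dd.1, pos.2 + dd.2)
        if adj ∉ H ∧ pvA_inBounds a b c d adj = true then result ++ [adj] else result) acc)
    ↔ (q ∈ acc ∨ ∃ dd ∈ ds, q = (pos.1 + dd.1, pos.2 + dd.2) ∧ q ∉ H ∧
        pvA_inBounds a b c d q = true) := by
  intro ds
  induction ds with
  | nil => intro acc; simp
  | cons dd ds ih =>
    intro acc
    rw [List.foldl_cons]
    dsimp only
    rw [ih]
    by_cases hcond : (pos.1 + dd.1, pos.2 + dd.2) ∉ H ∧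
        pvA_inBounds a b c d (pos.1 + dd.1, pos.2 + dd.2) = true
    · rw [if_pos hcond]
      simp only [List.mem_append, List.mem_cons, List.not_mem_nil, or_false]
      constructor
      · rintro ((h | rfl) | ⟨e, he, hq⟩)
        · exact Or.inl h
        · exact Or.inr ⟨dd, Or.inl rfl, rfl, hcond⟩
        · exact Or.inr ⟨e, Or.inr he, hq⟩
      · rintro (h | ⟨e, (rfl | he), hq⟩)
        · exact Or.inl (Or.inl h)
        · exact Or.inl (Or.inr hq.1)
        · exact Or.inr ⟨e, he, hq⟩
    · rw [if_neg hcond]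
      simp only [List.mem_cons]
      constructor
      · rintro (h | ⟨e, he, hq⟩)
        · exact Or.inl h
        · exact Or.inr ⟨e, Or.inr he, hq⟩
      · rintro (h | ⟨e, (rfl | he), hq⟩)
        · exact Or.inl h
        · exact absurd (hq.1 ▸ hcond) (fun hc => hc ⟨hq.2.1, hq.2.2⟩)
        · exact Or.inr ⟨e, he, hq⟩

lemma pv_mem_emptyNeighbors {H : List (Int × Int)} {a b c d : Int} {p q : Int × Int} :
    q ∈ pvA_emptyNeighbors H a b c d p ↔ q ∈ pvNbrs p ∧ pvFreeP H a b c d q := by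
  rw [pvA_emptyNeighbors, pv_emptyNb_fold_mem]
  simp only [List.not_mem_nil, false_or, List.mem_cons, List.not_mem_nil, or_false,
    exists_eq_or_imp, exists_eq_left]
  have hB : (pvA_inBounds a b c d q = true) ↔ (a ≤ q.1 ∧ q.1 ≤ b ∧ c ≤ q.2 ∧ q.2 ≤ d) := by
    simp [pvA_inBounds]
  have h1 : (p.1 + 0, p.2 + 1) = (p.1, p.2 + 1) := by apply Prod.ext <;> simp
  have h2 : (p.1 + 0, p.2 + -1) = (p.1, p.2 - 1) := by apply Prod.ext <;> simp <;> ring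
  have h3 : (p.1 + -1, p.2 + 0) = (p.1 - 1, p.2) := by apply Prod.ext <;> simp <;> ring
  have h4 : (p.1 + 1, p.2 + 0) = (p.1 + 1, p.2) := by apply Prod.ext <;> simp
  rw [h1, h2, h3, h4]
  simp only [pvNbrs, List.mem_cons, List.not_mem_nil, or_false, pvFreeP, hB]
  tauto

lemma pvA_pop_none {front back : List (Int × Int)} (h : pvA_pop front back = none) :
    front = [] ∧ back = [] := by
  cases front with
  | cons q f => simp [pvA_pop] at h
  | nil =>
    cases hr : back.reverse with
    | nil => exact ⟨rfl, by simpa using congrArg List.reverse hr⟩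
    | cons q f => rw [pvA_pop] at h; simp [hr] at h

lemma pvA_pop_some {front back : List (Int × Int)} {pos : Int × Int}
    {f' b' : List (Int × Int)} (h : pvA_pop front back = some (pos, f', b')) :
    (∀ p, (p ∈ front ∨ p ∈ back) ↔ (p = pos ∨ p ∈ f' ∨ p ∈ b')) ∧
    front.length + back.length = 1 + f'.length + b'.length := by
  cases front with
  | cons q f =>
    simp only [pvA_pop, Option.some.injEq, Prod.mk.injEq] at h
    obtain ⟨rfl, rfl, rfl⟩ := h
    constructor
    · intro p
      simp only [List.mem_cons]
      tauto
    · simp only [List.length_cons]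
      omega
  | nil =>
    cases hr : back.reverse with
    | nil => rw [pvA_pop] at h; simp [hr] at h
    | cons q f =>
      rw [pvA_pop] at h
      simp only [hr, Option.some.injEq, Prod.mk.injEq] at h
      obtain ⟨h1, h2, h3⟩ := h
      have hb : back = (q :: f).reverse := by rw [← hr, List.reverse_reverse]
      constructor
      · intro p
        rw [hb, ← h1, ← h2, ← h3]
        simp only [List.mem_reverse, List.mem_cons, List.not_mem_nil, or_false, false_or]
      · rw [hb, ← h2, ← h3]
        simp only [List.length_reverse, List.length_cons, List.length_nil]
        omega

-- characterization of the neighbor-pushing fold of A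
lemma pvA_push_fold (ns : List (Int × Int)) :
    ∀ (back : List (Int × Int)) (found : Std.HashSet (Int × Int)),
    ∃ t : List (Int × Int),
      (pvA_pushNeighbors ns back found).1 = t.reverse ++ back ∧
      (∀ x, x ∈ (pvA_pushNeighbors ns back found).2 ↔ x ∈ found ∨ x ∈ t) ∧
      (pvA_pushNeighbors ns back found).2.size = found.size + t.length ∧
      t.Nodup ∧ (∀ n ∈ t, n ∉ found) ∧ (∀ n ∈ t, n ∈ ns) ∧
      (∀ n ∈ ns, n ∈ found ∨ n ∈ t) := by
  induction ns with
  | nil =>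
    intro back found
    exact ⟨[], by simp [pvA_pushNeighbors], by simp [pvA_pushNeighbors],
      by simp [pvA_pushNeighbors], by simp, by simp, by simp, by simp⟩
  | cons n ns ih =>
    intro back found
    by_cases hn : n ∈ found
    · have hstep : pvA_pushNeighbors (n :: ns) back found = pvA_pushNeighbors ns back found := by
        rw [pvA_pushNeighbors, List.foldl_cons, if_pos hn]
        rfl
      obtain ⟨t, h1, h2, h3, h4, h5, h6, h7⟩ := ih back found
      rw [hstep]
      refine ⟨t, h1, h2, h3, h4, h5, fun m hm => List.mem_cons_of_mem _ (h6 m hm), ?_⟩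
      intro m hm
      rcases List.mem_cons.mp hm with rfl | hm'
      · exact Or.inl hn
      · exact h7 m hm'
    · have hstep : pvA_pushNeighbors (n :: ns) back found
          = pvA_pushNeighbors ns (n :: back) (found.insert n) := by
        rw [pvA_pushNeighbors, List.foldl_cons, if_neg hn]
        rfl
      obtain ⟨t, h1, h2, h3, h4, h5, h6, h7⟩ := ih (n :: back) (found.insert n)
      rw [hstep]
      refine ⟨n :: t, ?_, ?_, ?_, ?_, ?_, ?_, ?_⟩
      · rw [h1]
        simp [List.append_assoc]
      · intro x
        rw [h2 x, pv_mem_insert]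
        simp only [List.mem_cons]
        tauto
      · rw [h3, pv_size_insert_of_not_mem hn]
        simp only [List.length_cons]
        omega
      · refine List.nodup_cons.mpr ⟨?_, h4⟩
        intro hcontra
        exact h5 n hcontra ((pv_mem_insert found n n).mpr (Or.inr rfl))
      · intro m hm
        rcases List.mem_cons.mp hm with rfl | hm'
        · exact hn
        · intro hmf
          exact h5 m hm' ((pv_mem_insert found n m).mpr (Or.inl hmf))
      · intro m hm
        rcases List.mem_cons.mp hm with rfl | hm'
        · exact List.mem_cons_self
        · exact List.mem_cons_of_mem _ (h6 m hm')
      · intro m hm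
        rcases List.mem_cons.mp hm with rfl | hm'
        · exact Or.inr List.mem_cons_self
        · rcases h7 m hm' with hmf | hmt
          · rcases (pv_mem_insert found n m).mp hmf with h | rfl
            · exact Or.inl h
            · exact Or.inr List.mem_cons_self
          · exact Or.inr (List.mem_cons_of_mem _ hmt)

-- the invariant of A's BFS state (queue front/back, seen_empties, found_neighbors)
structure pvAInv (H : List (Int × Int)) (a b c d : Int)
    (front back : List (Int × Int)) (seen found : Std.HashSet (Int × Int)) : Prop where
  seenReach : ∀ p ∈ seen, pvReach H a b c d p
  qReach : ∀ p, (p ∈ front ∨ p ∈ back) → pvReach H a b c d p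
  foundSub : ∀ p ∈ found, p ∈ seen ∨ p ∈ front ∨ p ∈ back
  foundBox : ∀ p ∈ found, a ≤ p.1 ∧ p.1 ≤ b ∧ c ≤ p.2 ∧ p.2 ≤ d
  closedSeen : ∀ p ∈ seen, ∀ n ∈ pvNbrs p, pvFreeP H a b c d n → n ∈ found

lemma pvA_bfs_spec (H : List (Int × Int)) (a b c d : Int) :
    ∀ (fuel : Nat) (front back : List (Int × Int)) (seen found : Std.HashSet (Int × Int)),
    pvAInv H a b c d front back seen found →
    pvBoxN a b c d + front.length + back.length < fuel + found.size →
    pvAInv H a b c d [] [] (pvA_bfs H a b c d fuel front back seen found).1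
      (pvA_bfs H a b c d fuel front back seen found).2
    ∧ (∀ p, (p ∈ seen ∨ p ∈ front ∨ p ∈ back) →
        p ∈ (pvA_bfs H a b c d fuel front back seen found).1)
    ∧ (∀ p ∈ found, p ∈ (pvA_bfs H a b c d fuel front back seen found).2) := by
  intro fuel
  induction fuel with
  | zero =>
    intro front back seen found hinv hfuel
    exfalso
    have := pv_hs_size_le_box a b c d found hinv.foundBox
    omega
  | succ m ih =>
    intro front back seen found hinv hfuel
    cases hpop : pvA_pop front back with
    | none =>
      obtain ⟨rfl, rfl⟩ := pvA_pop_none hpop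
      have hres : pvA_bfs H a b c d (m + 1) [] [] seen found = (seen, found) := by
        rw [pvA_bfs, hpop]
      rw [hres]
      refine ⟨⟨hinv.seenReach, ?_, ?_, hinv.foundBox, hinv.closedSeen⟩, ?_, fun p hp => hp⟩
      · intro p hp
        exact hinv.qReach p hp
      · exact hinv.foundSub
      · intro p hp
        rcases hp with h | h | h
        · exact h
        · exact absurd h List.not_mem_nil
        · exact absurd h List.not_mem_nil
    | some x =>
      obtain ⟨pos, f', b'⟩ := x
      obtain ⟨hqiff, hqlen⟩ := pvA_pop_some hpop
      obtain ⟨t, h1, h2, h3, h4, h5, h6, h7⟩ :=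
        pvA_push_fold (pvA_emptyNeighbors H a b c d pos) b' found
      have hres : pvA_bfs H a b c d (m + 1) front back seen found
          = pvA_bfs H a b c d m f'
              (pvA_pushNeighbors (pvA_emptyNeighbors H a b c d pos) b' found).1
              (if pos ∈ seen then seen else seen.insert pos)
              (pvA_pushNeighbors (pvA_emptyNeighbors H a b c d pos) b' found).2 := by
        rw [pvA_bfs, hpop]
      have hposR : pvReach H a b c d pos := hinv.qReach pos ((hqiff pos).mpr (Or.inl rfl))
      have htReach : ∀ n ∈ t, pvReach H a b c d n := by
        intro n hn
        have h' := pv_mem_emptyNeighbors.mp (h6 n hn)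
        exact pvReach.step pos n hposR h'.1 h'.2
      have hmemb' : ∀ p,
          p ∈ (pvA_pushNeighbors (pvA_emptyNeighbors H a b c d pos) b' found).1 ↔
            p ∈ b' ∨ p ∈ t := by
        intro p
        rw [h1]
        simp only [List.mem_append, List.mem_reverse]
        tauto
      have hinv' : pvAInv H a b c d f'
          (pvA_pushNeighbors (pvA_emptyNeighbors H a b c d pos) b' found).1
          (if pos ∈ seen then seen else seen.insert pos)
          (pvA_pushNeighbors (pvA_emptyNeighbors H a b c d pos) b' found).2 := by
        refine ⟨?_, ?_, ?_, ?_, ?_⟩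
        · intro p hp
          rcases (pv_mem_condInsert seen pos p).mp hp with h | rfl
          · exact hinv.seenReach p h
          · exact hposR
        · intro p hp
          rcases hp with h | h
          · exact hinv.qReach p ((hqiff p).mpr (Or.inr (Or.inl h)))
          · rcases (hmemb' p).mp h with h' | h'
            · exact hinv.qReach p ((hqiff p).mpr (Or.inr (Or.inr h')))
            · exact htReach p h'
        · intro p hp
          rcases (h2 p).mp hp with h | h
          · rcases hinv.foundSub p h with h' | h'
            · exact Or.inl ((pv_mem_condInsert seen pos p).mpr (Or.inl h'))
            · rcases (hqiff p).mp h' with heq | h'' | h''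
              · exact Or.inl ((pv_mem_condInsert seen pos p).mpr (Or.inr heq))
              · exact Or.inr (Or.inl h'')
              · exact Or.inr (Or.inr ((hmemb' p).mpr (Or.inl h'')))
          · exact Or.inr (Or.inr ((hmemb' p).mpr (Or.inr h)))
        · intro p hp
          rcases (h2 p).mp hp with h | h
          · exact hinv.foundBox p h
          · exact (pvReach_free (htReach p h)).2
        · intro p hp n hn hf
          rcases (pv_mem_condInsert seen pos p).mp hp with h | heq
          · exact (h2 n).mpr (Or.inl (hinv.closedSeen p h n hn hf))
          · subst heq
            have hns : n ∈ pvA_emptyNeighbors H a b c d p :=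
              pv_mem_emptyNeighbors.mpr ⟨hn, hf⟩
            rcases h7 n hns with h' | h'
            · exact (h2 n).mpr (Or.inl h')
            · exact (h2 n).mpr (Or.inr h')
      have hlenb' : (pvA_pushNeighbors (pvA_emptyNeighbors H a b c d pos) b' found).1.length
          = b'.length + t.length := by
        rw [h1]
        simp only [List.length_append, List.length_reverse]
        omega
      have hfuel' : pvBoxN a b c d + f'.length
          + (pvA_pushNeighbors (pvA_emptyNeighbors H a b c d pos) b' found).1.length
          < m + (pvA_pushNeighbors (pvA_emptyNeighbors H a b c d pos) b' found).2.size := by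
        rw [hlenb', h3]
        omega
      obtain ⟨hI, hmono, hfmono⟩ := ih f'
        (pvA_pushNeighbors (pvA_emptyNeighbors H a b c d pos) b' found).1
        (if pos ∈ seen then seen else seen.insert pos)
        (pvA_pushNeighbors (pvA_emptyNeighbors H a b c d pos) b' found).2 hinv' hfuel'
      rw [hres]
      refine ⟨hI, ?_, ?_⟩
      · intro p hp
        rcases hp with h | h
        · exact hmono p (Or.inl ((pv_mem_condInsert seen pos p).mpr (Or.inl h)))
        · rcases (hqiff p).mp h with heq | h' | h'
          · exact hmono p (Or.inl ((pv_mem_condInsert seen pos p).mpr (Or.inr heq)))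
          · exact hmono p (Or.inr (Or.inl h'))
          · exact hmono p (Or.inr (Or.inr ((hmemb' p).mpr (Or.inl h'))))
      · intro p hp
        exact hfmono p ((h2 p).mpr (Or.inl hp))

lemma pvA_visit_spec (H : List (Int × Int)) (a b c d : Int) (pos : Int × Int)
    (hb : pos.1 = a ∨ pos.1 = b ∨ pos.2 = c ∨ pos.2 = d)
    (hin : a ≤ pos.1 ∧ pos.1 ≤ b ∧ c ≤ pos.2 ∧ pos.2 ≤ d)
    (st : Std.HashSet (Int × Int) × Std.HashSet (Int × Int))
    (hst : pvAInv H a b c d [] [] st.1 st.2) :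
    pvAInv H a b c d [] [] (pvA_visit H a b c d st pos).1 (pvA_visit H a b c d st pos).2
    ∧ (∀ p ∈ st.1, p ∈ (pvA_visit H a b c d st pos).1)
    ∧ (pos ∉ H → pos ∈ (pvA_visit H a b c d st pos).1) := by
  unfold pvA_visit
  by_cases hg : pos ∉ st.1 ∧ pos ∉ H
  · rw [if_pos hg]
    have hinv : pvAInv H a b c d [pos] [] st.1 st.2 := by
      refine ⟨hst.seenReach, ?_, ?_, hst.foundBox, hst.closedSeen⟩
      · intro p hp
        rcases hp with h | h
        · rcases List.mem_cons.mp h with heq | h'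
          · subst heq
            exact pvReach.base p ⟨hg.2, hin⟩ hb
          · exact absurd h' List.not_mem_nil
        · exact absurd h List.not_mem_nil
      · intro p hp
        rcases hst.foundSub p hp with h | h | h
        · exact Or.inl h
        · exact absurd h List.not_mem_nil
        · exact absurd h List.not_mem_nil
    have hfuel : pvBoxN a b c d + ([pos] : List (Int × Int)).length
        + ([] : List (Int × Int)).length < (pvBoxN a b c d + 2) + st.2.size := by
      simp
      omega
    obtain ⟨hI, hmono, _⟩ :=
      pvA_bfs_spec H a b c d (pvBoxN a b c d + 2) [pos] [] st.1 st.2 hinv hfuel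
    exact ⟨hI, fun p hp => hmono p (Or.inl hp),
      fun _ => hmono pos (Or.inr (Or.inl List.mem_cons_self))⟩
  · rw [if_neg hg]
    refine ⟨hst, fun p hp => hp, ?_⟩
    intro hnH
    rcases not_and_or.mp hg with h | h
    · exact not_not.mp h
    · exact absurd hnH h

lemma pvA_visit_foldl_spec (H : List (Int × Int)) (a b c d : Int) (l : List (Int × Int))
    (hl : ∀ pos ∈ l, (pos.1 = a ∨ pos.1 = b ∨ pos.2 = c ∨ pos.2 = d) ∧
      (a ≤ pos.1 ∧ pos.1 ≤ b ∧ c ≤ pos.2 ∧ pos.2 ≤ d)) :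
    ∀ (st : Std.HashSet (Int × Int) × Std.HashSet (Int × Int)),
    pvAInv H a b c d [] [] st.1 st.2 →
    pvAInv H a b c d [] [] (l.foldl (pvA_visit H a b c d) st).1
      (l.foldl (pvA_visit H a b c d) st).2
    ∧ (∀ p ∈ st.1, p ∈ (l.foldl (pvA_visit H a b c d) st).1)
    ∧ (∀ pos ∈ l, pos ∉ H → pos ∈ (l.foldl (pvA_visit H a b c d) st).1) := by
  induction l with
  | nil => intro st hst; exact ⟨hst, fun p hp => hp, by simp⟩
  | cons pos l ih =>
    intro st hst
    have hpos := hl pos List.mem_cons_self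
    obtain ⟨h1, h2, h3⟩ := pvA_visit_spec H a b c d pos hpos.1 hpos.2 st hst
    obtain ⟨hI, hmono, hcov⟩ := ih (fun p hp => hl p (List.mem_cons_of_mem _ hp))
      (pvA_visit H a b c d st pos) h1
    rw [List.foldl_cons]
    refine ⟨hI, fun p hp => hmono p (h2 p hp), ?_⟩
    intro q hq hqH
    rcases List.mem_cons.mp hq with heq | h
    · subst heq
      exact hmono q (h3 hqH)
    · exact hcov q h hqH

lemma pvA_state_char (H : List (Int × Int)) (a b c d : Int) (hab : a ≤ b) (hcd : c ≤ d) :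
    ∀ p, p ∈ (pvA_state H a b c d).1 ↔ pvReach H a b c d p := by
  have hstate : ((PySem.List.pyRange a (b + 1) 1).flatMap (fun y => [(y, c), (y, d)])).foldl
        (pvA_visit H a b c d)
        (((PySem.List.pyRange c (d + 1) 1).flatMap (fun x => [(a, x), (b, x)])).foldl
          (pvA_visit H a b c d) (∅, ∅))
      = pvA_state H a b c d := by
    unfold pvA_state
    rw [List.foldl_flatMap, List.foldl_flatMap]
  have hL1 : ∀ pos ∈ (PySem.List.pyRange c (d + 1) 1).flatMap (fun x => [(a, x), (b, x)]),
      (pos.1 = a ∨ pos.1 = b ∨ pos.2 = c ∨ pos.2 = d) ∧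
      (a ≤ pos.1 ∧ pos.1 ≤ b ∧ c ≤ pos.2 ∧ pos.2 ≤ d) := by
    intro pos hpos
    simp only [List.mem_flatMap, PySem.List.mem_pyRange_one, List.mem_cons,
      List.not_mem_nil, or_false] at hpos
    obtain ⟨x, hx, hpe⟩ := hpos
    rcases hpe with rfl | rfl
    · exact ⟨Or.inl rfl, le_refl a, hab, by omega, by omega⟩
    · exact ⟨Or.inr (Or.inl rfl), hab, le_refl b, by omega, by omega⟩
  have hL2 : ∀ pos ∈ (PySem.List.pyRange a (b + 1) 1).flatMap (fun y => [(y, c), (y, d)]),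
      (pos.1 = a ∨ pos.1 = b ∨ pos.2 = c ∨ pos.2 = d) ∧
      (a ≤ pos.1 ∧ pos.1 ≤ b ∧ c ≤ pos.2 ∧ pos.2 ≤ d) := by
    intro pos hpos
    simp only [List.mem_flatMap, PySem.List.mem_pyRange_one, List.mem_cons,
      List.not_mem_nil, or_false] at hpos
    obtain ⟨y, hy, hpe⟩ := hpos
    rcases hpe with rfl | rfl
    · exact ⟨Or.inr (Or.inr (Or.inl rfl)), by omega, by omega, le_refl c, hcd⟩
    · exact ⟨Or.inr (Or.inr (Or.inr rfl)), by omega, by omega, hcd, le_refl d⟩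
  have hinit : pvAInv H a b c d [] [] (∅ : Std.HashSet (Int × Int))
      (∅ : Std.HashSet (Int × Int)) := by
    refine ⟨?_, ?_, ?_, ?_, ?_⟩ <;> simp
  obtain ⟨hI1, _, hcov1⟩ := pvA_visit_foldl_spec H a b c d _ hL1 (∅, ∅) hinit
  obtain ⟨hI2, hmono2, hcov2⟩ := pvA_visit_foldl_spec H a b c d _ hL2 _ hI1
  rw [hstate] at hI2 hmono2 hcov2
  refine fun p => ⟨fun hp => hI2.seenReach p hp, ?_⟩
  refine pvReach_mem_of_closed ?_ ?_ p
  · intro q hqf hqb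
    have hqmem : q = (q.1, q.2) := rfl
    rcases hqb with hq | hq | hq | hq
    · refine hmono2 q (hcov1 q ?_ hqf.1)
      simp only [List.mem_flatMap, PySem.List.mem_pyRange_one, List.mem_cons,
        List.not_mem_nil, or_false]
      exact ⟨q.2, by have := hqf.2; omega, Or.inl (by rw [hqmem, hq])⟩
    · refine hmono2 q (hcov1 q ?_ hqf.1)
      simp only [List.mem_flatMap, PySem.List.mem_pyRange_one, List.mem_cons,
        List.not_mem_nil, or_false]
      exact ⟨q.2, by have := hqf.2; omega, Or.inr (by rw [hqmem, hq])⟩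
    · refine hcov2 q ?_ hqf.1
      simp only [List.mem_flatMap, PySem.List.mem_pyRange_one, List.mem_cons,
        List.not_mem_nil, or_false]
      exact ⟨q.1, by have := hqf.2; omega, Or.inl (by rw [hqmem, hq])⟩
    · refine hcov2 q ?_ hqf.1
      simp only [List.mem_flatMap, PySem.List.mem_pyRange_one, List.mem_cons,
        List.not_mem_nil, or_false]
      exact ⟨q.1, by have := hqf.2; omega, Or.inr (by rw [hqmem, hq])⟩
  · intro q hq n hn hnf
    have hfound := hI2.closedSeen q hq n hn hnf
    rcases hI2.foundSub n hfound with h | h | h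
    · exact h
    · exact absurd h List.not_mem_nil
    · exact absurd h List.not_mem_nil

lemma pv_minmax_le (H : List Int) (hne : H ≠ []) :
    (PySem.List.min? H (fun v => v)).getD 0 ≤ (PySem.List.max? H (fun v => v)).getD 0 := by
  cases hmin : PySem.List.min? H (fun v => v) with
  | none => exact absurd ((PySem.List.min?_eq_none_iff H _).mp hmin) hne
  | some m =>
    cases hmax : PySem.List.max? H (fun v => v) with
    | none => exact absurd ((PySem.List.max?_eq_none_iff H _).mp hmax) hne
    | some M =>
      simp only [Option.getD_some]
      exact PySem.List.max?_isMax hmax m (PySem.List.min?_mem hmin)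

-- ===== B-side lemmas: union-find =====

-- connectivity through free cells (reflexive on free cells, grows by one neighbor step)
inductive pvConn (H : List (Int × Int)) (a b c d : Int) (p : Int × Int) : (Int × Int) → Prop where
  | refl : pvFreeP H a b c d p → pvConn H a b c d p p
  | step (q r : Int × Int) : pvConn H a b c d p q → r ∈ pvNbrs q →
      pvFreeP H a b c d r → pvConn H a b c d p r

lemma pvConn_free_right {H : List (Int × Int)} {a b c d : Int} {p q : Int × Int}
    (h : pvConn H a b c d p q) : pvFreeP H a b c d q := by
  cases h with
  | refl hf => exact hf
  | step _ _ _ _ hf => exact hf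

lemma pvConn_trans {H : List (Int × Int)} {a b c d : Int} {p q r : Int × Int}
    (h1 : pvConn H a b c d p q) (h2 : pvConn H a b c d q r) : pvConn H a b c d p r := by
  induction h2 with
  | refl _ => exact h1
  | step _ _ _ hn hf ih => exact pvConn.step _ _ ih hn hf

lemma pvNbrs_symm {p q : Int × Int} (h : q ∈ pvNbrs p) : p ∈ pvNbrs q := by
  simp only [pvNbrs, List.mem_cons, List.not_mem_nil, or_false] at h ⊢
  have hp : p = (p.1, p.2) := rfl
  rcases h with rfl | rfl | rfl | rfl
  · right; left; rw [hp]; simp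
  · left; rw [hp]; simp
  · right; right; right; rw [hp]; simp
  · right; right; left; rw [hp]; simp

lemma pvConn_symm {H : List (Int × Int)} {a b c d : Int} {p q : Int × Int}
    (h : pvConn H a b c d p q) : pvConn H a b c d q p := by
  induction h with
  | refl hf => exact pvConn.refl hf
  | step q' r' hc hn hf ih =>
    exact pvConn_trans (pvConn.step r' q' (pvConn.refl hf) (pvNbrs_symm hn)
      (pvConn_free_right hc)) ih

lemma pvReach_iff_conn {H : List (Int × Int)} {a b c d : Int} {p : Int × Int} :
    pvReach H a b c d p ↔ ∃ s, pvFreeP H a b c d s ∧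
      (s.1 = a ∨ s.1 = b ∨ s.2 = c ∨ s.2 = d) ∧ pvConn H a b c d s p := by
  constructor
  · intro h
    induction h with
    | base p hf hb => exact ⟨p, hf, hb, pvConn.refl hf⟩
    | step p n _ hn hf ih =>
      obtain ⟨s, hsf, hsb, hc⟩ := ih
      exact ⟨s, hsf, hsb, pvConn.step _ _ hc hn hf⟩
  · rintro ⟨s, hsf, hsb, hc⟩
    induction hc with
    | refl hf => exact pvReach.base s hf hsb
    | step q r hc hn hf ih => exact pvReach.step q r ih hn hf

-- ===== cells =====

lemma pv_cells_if_eq (blocked : PySem.Set (Int × Int)) (y x : Int) :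
    (if PySem.Set.contains blocked (y, x) then (none : Option (Int × Int)) else some (y, x))
      = if (y, x) ∈ blocked then none else some (y, x) := by
  by_cases h : (y, x) ∈ blocked
  · rw [if_pos h, if_pos]
    exact (PySem.Set.contains_iff blocked (y, x)).mpr h
  · rw [if_neg h, if_neg]
    intro hc
    exact h ((PySem.Set.contains_iff blocked (y, x)).mp hc)

lemma pv_mem_cells {H : List (Int × Int)} {a b c d : Int} {q : Int × Int} :
    q ∈ pvB_cellsOf (PySem.Set.ofList H) a b c d ↔ pvFreeP H a b c d q := by
  unfold pvB_cellsOf pvFreeP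
  simp only [List.mem_flatMap, List.mem_filterMap, PySem.List.mem_pyRange_one,
    pv_cells_if_eq, PySem.Set.mem_ofList]
  constructor
  · rintro ⟨y, hy, x, hx, hq⟩
    by_cases hb : ((y, x) : Int × Int) ∈ H
    · rw [if_pos hb] at hq; simp at hq
    · rw [if_neg hb] at hq
      simp only [Option.some.injEq] at hq
      subst hq
      exact ⟨hb, by omega, by omega, by omega, by omega⟩
  · rintro ⟨hnH, h1, h2, h3, h4⟩
    refine ⟨q.1, by omega, q.2, by omega, ?_⟩
    rw [if_neg (by simpa using hnH)]

lemma pv_cells_nodup {H : List (Int × Int)} {a b c d : Int} :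
    (pvB_cellsOf (PySem.Set.ofList H) a b c d).Nodup := by
  unfold pvB_cellsOf
  rw [List.nodup_flatMap]
  constructor
  · intro y _
    refine List.Nodup.filterMap ?_ (PySem.List.nodup_pyRange_one c (d + 1))
    intro x x' q hx hx'
    rw [pv_cells_if_eq] at hx hx'
    by_cases h1 : ((y, x) : Int × Int) ∈ PySem.Set.ofList H
    · rw [if_pos h1] at hx; exact absurd hx (Option.not_mem_none q)
    · rw [if_neg h1] at hx
      by_cases h2 : ((y, x') : Int × Int) ∈ PySem.Set.ofList H
      · rw [if_pos h2] at hx'; exact absurd hx' (Option.not_mem_none q)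
      · rw [if_neg h2] at hx'
        rw [Option.mem_def] at hx hx'
        simp only [Option.some.injEq] at hx hx'
        have : ((y, x) : Int × Int) = (y, x') := hx.trans hx'.symm
        simpa using congrArg Prod.snd this
  · have hnd := PySem.List.nodup_pyRange_one a (b + 1)
    have hpw : List.Pairwise (fun (y y' : Int) => y ≠ y') (PySem.List.pyRange a (b + 1)) :=
      hnd.pairwise_of_forall_ne (fun z _ z' _ h => h)
    refine hpw.imp_of_mem ?_
    intro y y' _ _ hne
    simp only [Function.onFun, List.disjoint_left]
    intro q hq hq'
    simp only [List.mem_filterMap, pv_cells_if_eq] at hq hq'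
    obtain ⟨x, _, hx⟩ := hq
    obtain ⟨x', _, hx'⟩ := hq'
    by_cases h1 : ((y, x) : Int × Int) ∈ PySem.Set.ofList H
    · rw [if_pos h1] at hx; simp at hx
    · rw [if_neg h1] at hx
      by_cases h2 : ((y', x') : Int × Int) ∈ PySem.Set.ofList H
      · rw [if_pos h2] at hx'; simp at hx'
      · rw [if_neg h2] at hx'
        simp only [Option.some.injEq] at hx hx'
        apply hne
        have := congrArg Prod.fst (hx.trans hx'.symm)
        simpa using this

-- ===== the index dictionary =====

lemma pv_dict_fold_get_of_ne (l : List ((Int × Int) × Nat)) :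
    ∀ (d : Std.HashMap (Int × Int) Nat) (k : Int × Int), (∀ ci ∈ l, ci.1 ≠ k) →
    (l.foldl (fun d ci => d.insert ci.1 ci.2) d)[k]? = d[k]? := by
  induction l with
  | nil => intro d k _; rfl
  | cons ci l ih =>
    intro d k hk
    rw [List.foldl_cons, ih _ k (fun c hc => hk c (List.mem_cons_of_mem _ hc))]
    rw [Std.HashMap.getElem?_insert,
      if_neg (by simpa using hk ci List.mem_cons_self)]

lemma pv_dict_fold_get_of_mem (l : List ((Int × Int) × Nat)) :
    ∀ (d : Std.HashMap (Int × Int) Nat) (k : Int × Int) (i : Nat),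
    (l.map (fun ci => ci.1)).Nodup → (k, i) ∈ l →
    (l.foldl (fun d ci => d.insert ci.1 ci.2) d)[k]? = some i := by
  induction l with
  | nil => intro d k i _ h; exact absurd h List.not_mem_nil
  | cons ci l ih =>
    intro d k i hnd hmem
    rw [List.map_cons, List.nodup_cons] at hnd
    rcases List.mem_cons.mp hmem with rfl | hmem'
    · rw [List.foldl_cons,
        pv_dict_fold_get_of_ne l _ k
          (fun c hc hek => hnd.1 (hek ▸ List.mem_map_of_mem (f := fun ci => ci.1) hc))]
      rw [Std.HashMap.getElem?_insert, if_pos (by simp)]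
    · rw [List.foldl_cons]
      exact ih _ k i hnd.2 hmem'

lemma pv_zipIdx_prop {cells : List (Int × Int)} {ci : (Int × Int) × Nat}
    (h : ci ∈ cells.zipIdx) : ci.2 < cells.length ∧ cells.getD ci.2 (0, 0) = ci.1 := by
  obtain ⟨p, k⟩ := ci
  obtain ⟨-, hk, hp⟩ := List.mem_zipIdx h
  simp only [Nat.zero_add] at hk
  simp only [Nat.sub_zero] at hp
  exact ⟨hk, by rw [List.getD_eq_getElem _ _ hk, hp]⟩

lemma pv_mem_zipIdx_of_lt {cells : List (Int × Int)} {k : Nat} (hk : k < cells.length) :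
    (cells.getD k (0, 0), k) ∈ cells.zipIdx := by
  have h := List.getElem_zipIdx (l := cells) (j := 0) (i := k)
    (by simpa [List.length_zipIdx] using hk)
  rw [List.getD_eq_getElem _ _ hk]
  rw [Nat.zero_add] at h
  exact h ▸ List.getElem_mem _

lemma pv_index_get? {cells : List (Int × Int)} (hnd : cells.Nodup) (p : Int × Int) (i : Nat) :
    (pvB_index cells)[p]? = some i ↔ (i < cells.length ∧ cells.getD i (0, 0) = p) := by
  have hkeys : (cells.zipIdx.map (fun ci => ci.1)).Nodup := by
    have : cells.zipIdx.map (fun ci => ci.1) = cells := by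
      simpa using List.map_fst_zipIdx cells 0
    rw [this]; exact hnd
  constructor
  · intro h
    by_cases hp : p ∈ cells
    · obtain ⟨k, hk, rfl⟩ := List.mem_iff_getElem.mp hp
      have hmem : ((cells[k], k) : (Int × Int) × Nat) ∈ cells.zipIdx := by
        have := pv_mem_zipIdx_of_lt hk
        rwa [List.getD_eq_getElem _ _ hk] at this
      have := pv_dict_fold_get_of_mem cells.zipIdx ∅ _ k hkeys hmem
      rw [pvB_index] at h
      rw [this] at h
      obtain rfl := (Option.some.injEq _ _).mp h
      exact ⟨hk, List.getD_eq_getElem _ _ hk⟩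
    · exfalso
      have hnone : (pvB_index cells)[p]? = none := by
        rw [pvB_index, pv_dict_fold_get_of_ne _ _ p ?_]
        · exact Std.HashMap.getElem?_empty
        · intro ci hci heq
          obtain ⟨h1, h2⟩ := pv_zipIdx_prop hci
          apply hp
          rw [← heq, ← h2, List.getD_eq_getElem _ _ h1]
          exact List.getElem_mem h1
      rw [hnone] at h
      simp at h
  · rintro ⟨hi, rfl⟩
    exact pv_dict_fold_get_of_mem cells.zipIdx ∅ _ i hkeys
      (pv_mem_zipIdx_of_lt hi)

-- ===== the union-find forest =====

-- parent links point to smaller indices of connected cells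
structure pvUF (H : List (Int × Int)) (a b c d : Int)
    (cells : List (Int × Int)) (P : Array Nat) : Prop where
  len : P.size = cells.length
  le : ∀ i, i < P.size → P.getD i 0 ≤ i
  conn : ∀ i, i < P.size →
    pvConn H a b c d (cells.getD (P.getD i 0) (0, 0)) (cells.getD i (0, 0))

lemma pv_getD_range (n k : Nat) (hk : k < n) : (Array.range n).getD k 0 = k := by
  rw [Array.getD_eq_getD_getElem?, Array.getElem?_eq_getElem (by simpa using hk)]
  simp

lemma pvUF_init {H : List (Int × Int)} {a b c d : Int} {cells : List (Int × Int)}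
    (hf : ∀ i, i < cells.length → pvFreeP H a b c d (cells.getD i (0, 0))) :
    pvUF H a b c d cells (Array.range cells.length) := by
  refine ⟨by simp, ?_, ?_⟩
  · intro i hi
    rw [Array.size_range] at hi
    rw [pv_getD_range _ _ hi]
  · intro i hi
    rw [Array.size_range] at hi
    rw [pv_getD_range _ _ hi]
    exact pvConn.refl (hf i hi)

lemma pv_getD_set (P : Array Nat) (r v x : Nat) (hr : r < P.size) :
    (P.setIfInBounds r v).getD x 0 = if r = x then v else P.getD x 0 := by
  rw [Array.getD_eq_getD_getElem?, Array.getElem?_setIfInBounds, Array.getD_eq_getD_getElem?]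
  split_ifs with h
  · rfl
  · rfl

-- find returns a root: it is ≤ its argument, a fixpoint of the parent map,
-- and connected to its argument
lemma pvFind_spec {H : List (Int × Int)} {a b c d : Int} {cells : List (Int × Int)}
    {P : Array Nat} (hUF : pvUF H a b c d cells P) :
    ∀ (f i : Nat), i < f → i < P.size →
    pvFind P f i ≤ i ∧ pvFind P f i < P.size ∧
    P.getD (pvFind P f i) 0 = pvFind P f i ∧
    pvConn H a b c d (cells.getD (pvFind P f i) (0, 0)) (cells.getD i (0, 0)) := by
  intro f
  induction f with
  | zero => intro i hif _; omega
  | succ m ih =>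
    intro i hif hi
    rw [pvFind]
    by_cases hroot : P.getD i 0 = i
    · rw [if_pos hroot]
      refine ⟨le_refl i, hi, hroot, ?_⟩
      exact pvConn.refl (pvConn_free_right (hUF.conn i hi))
    · rw [if_neg hroot]
      have hlt : P.getD i 0 < i := lt_of_le_of_ne (hUF.le i hi) hroot
      obtain ⟨k1, k2, k3, k4⟩ := ih (P.getD i 0) (by omega) (by omega)
      exact ⟨le_trans k1 (le_of_lt hlt), k2, k3, pvConn_trans k4 (hUF.conn i hi)⟩

-- reparenting a root r to a root v < r redirects exactly the finds that ended at r
lemma pvFind_set {H : List (Int × Int)} {a b c d : Int} {cells : List (Int × Int)}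
    {P : Array Nat} (hUF : pvUF H a b c d cells P) {r v : Nat}
    (hr : r < P.size) (hrroot : P.getD r 0 = r) (hvroot : P.getD v 0 = v) (hvr : v < r) :
    ∀ (f i : Nat), i < f → i < P.size →
    pvFind (P.setIfInBounds r v) f i = if pvFind P f i = r then v else pvFind P f i := by
  intro f
  induction f with
  | zero => intro i hif _; omega
  | succ m ih =>
    intro i hif hi
    by_cases hir : i = r
    · subst hir
      have hlhs : pvFind (P.setIfInBounds i v) (m + 1) i = pvFind (P.setIfInBounds i v) m v := by
        rw [pvFind, pv_getD_set P i v i hr, if_pos rfl, if_neg (by omega)]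
      have hrhs : pvFind P (m + 1) i = i := by
        rw [pvFind, if_pos hrroot]
      rw [hlhs, hrhs, if_pos rfl]
      cases m with
      | zero => rfl
      | succ m' =>
        rw [pvFind, pv_getD_set P i v v hr, if_neg (show i ≠ v by omega), hvroot, if_pos rfl]
    · have hset : (P.setIfInBounds r v).getD i 0 = P.getD i 0 := by
        rw [pv_getD_set P r v i hr, if_neg (fun h => hir h.symm)]
      by_cases hroot : P.getD i 0 = i
      · rw [pvFind, pvFind, hset, if_pos hroot, if_pos hroot, if_neg hir]
      · have hlt : P.getD i 0 < i := lt_of_le_of_ne (hUF.le i hi) hroot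
        rw [pvFind, pvFind, hset, if_neg hroot, if_neg hroot]
        exact ih (P.getD i 0) (by omega) (by omega)

-- two indices have equal roots
def pvRootEq (P : Array Nat) (i j : Nat) : Prop :=
  pvFind P P.size i = pvFind P P.size j

lemma pvUnion_spec {H : List (Int × Int)} {a b c d : Int} {cells : List (Int × Int)}
    {P : Array Nat} (hUF : pvUF H a b c d cells P) {i j : Nat}
    (hi : i < P.size) (hj : j < P.size)
    (hc : pvConn H a b c d (cells.getD i (0, 0)) (cells.getD j (0, 0))) :
    pvUF H a b c d cells (pvUnion P i j) ∧ (pvUnion P i j).size = P.size ∧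
    (∀ x y, x < P.size → y < P.size → pvRootEq P x y → pvRootEq (pvUnion P i j) x y) ∧
    pvRootEq (pvUnion P i j) i j := by
  obtain ⟨ha1, ha2, ha3, ha4⟩ := pvFind_spec hUF P.size i hi hi
  obtain ⟨hb1, hb2, hb3, hb4⟩ := pvFind_spec hUF P.size j hj hj
  set ra := pvFind P P.size i with hra
  set rb := pvFind P P.size j with hrb
  by_cases heq : ra = rb
  · have hU : pvUnion P i j = P := by rw [pvUnion, ← hra, ← hrb, if_pos heq]
    rw [hU]
    exact ⟨hUF, rfl, fun x y _ _ h => h, heq⟩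
  · have hU : pvUnion P i j = P.setIfInBounds (max ra rb) (min ra rb) := by
      rw [pvUnion, ← hra, ← hrb, if_neg heq]
    have hcr : pvConn H a b c d (cells.getD ra (0, 0)) (cells.getD rb (0, 0)) :=
      pvConn_trans ha4 (pvConn_trans hc (pvConn_symm hb4))
    have hmaxlt : max ra rb < P.size := by omega
    have hminmax : min ra rb < max ra rb := by omega
    have hmaxroot : P.getD (max ra rb) 0 = max ra rb := by
      rcases max_choice ra rb with h | h <;> rw [h] <;> [exact ha3; exact hb3]
    have hminroot : P.getD (min ra rb) 0 = min ra rb := by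
      rcases min_choice ra rb with h | h <;> rw [h] <;> [exact ha3; exact hb3]
    have hfs := pvFind_set hUF hmaxlt hmaxroot hminroot hminmax
    have hlen : (P.setIfInBounds (max ra rb) (min ra rb)).size = P.size := by simp
    have hUF' : pvUF H a b c d cells (P.setIfInBounds (max ra rb) (min ra rb)) := by
      refine ⟨by rw [hlen]; exact hUF.len, ?_, ?_⟩
      · intro x hx
        rw [hlen] at hx
        rw [pv_getD_set P _ _ x hmaxlt]
        by_cases h : max ra rb = x
        · rw [if_pos h]; omega
        · rw [if_neg h]; exact hUF.le x hx
      · intro x hx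
        rw [hlen] at hx
        rw [pv_getD_set P _ _ x hmaxlt]
        by_cases h : max ra rb = x
        · rw [if_pos h, ← h]
          rcases le_total ra rb with hle | hle
          · rw [max_eq_right hle, min_eq_left hle]
            exact hcr
          · rw [max_eq_left hle, min_eq_right hle]
            exact pvConn_symm hcr
        · rw [if_neg h]
          exact hUF.conn x hx
    rw [hU]
    refine ⟨hUF', hlen, ?_, ?_⟩
    · intro x y hx hy hxy
      unfold pvRootEq at hxy ⊢
      rw [hlen, hfs P.size x hx hx, hfs P.size y hy hy, hxy]
    · unfold pvRootEq
      rw [hlen, hfs P.size i hi hi, hfs P.size j hj hj, ← hra, ← hrb]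
      rcases le_total ra rb with hle | hle
      · have hmax : max ra rb = rb := max_eq_right hle
        have hmin : min ra rb = ra := min_eq_left hle
        rw [hmax, if_neg heq, if_pos rfl, hmin]
      · have hmax : max ra rb = ra := max_eq_left hle
        have hmin : min ra rb = rb := min_eq_right hle
        rw [hmax, if_pos rfl, if_neg (fun h => heq h.symm), hmin]

-- ===== the union pass =====

-- one neighbor of the inner loop
def pvStep1 (idx : Std.HashMap (Int × Int) Nat) (i : Nat) (P : Array Nat)
    (nb : Int × Int) : Array Nat :=
  match idx[nb]? with
  | none => P
  | some j => pvUnion P i j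

lemma pvB_step_eq (idx : Std.HashMap (Int × Int) Nat) (P : Array Nat)
    (ci : (Int × Int) × Nat) :
    pvB_step idx P ci
      = pvStep1 idx ci.2 (pvStep1 idx ci.2 P (ci.1.1, ci.1.2 + 1)) (ci.1.1 + 1, ci.1.2) := by
  rfl

lemma pvStep1_spec {H : List (Int × Int)} {a b c d : Int} {cells : List (Int × Int)}
    {P : Array Nat} (hUF : pvUF H a b c d cells P) (hnd : cells.Nodup)
    (hfree : ∀ k, k < cells.length → pvFreeP H a b c d (cells.getD k (0, 0)))
    {i : Nat} (hi : i < cells.length) {nb : Int × Int}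
    (hnb : nb ∈ pvNbrs (cells.getD i (0, 0))) :
    pvUF H a b c d cells (pvStep1 (pvB_index cells) i P nb) ∧
    (∀ x y, x < cells.length → y < cells.length →
      pvRootEq P x y → pvRootEq (pvStep1 (pvB_index cells) i P nb) x y) ∧
    (∀ j, (pvB_index cells)[nb]? = some j →
      pvRootEq (pvStep1 (pvB_index cells) i P nb) i j) := by
  cases hg : (pvB_index cells)[nb]? with
  | none =>
    rw [pvStep1, hg]
    exact ⟨hUF, fun x y _ _ h => h, fun j hj => absurd hj (by simp)⟩
  | some j =>
    obtain ⟨hjlt, hjc⟩ := (pv_index_get? hnd nb j).mp hg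
    have hconn : pvConn H a b c d (cells.getD i (0, 0)) (cells.getD j (0, 0)) := by
      rw [hjc]
      exact pvConn.step _ _ (pvConn.refl (hfree i hi)) hnb (hjc ▸ hfree j hjlt)
    obtain ⟨k1, _, k3, k4⟩ := pvUnion_spec hUF (hUF.len ▸ hi) (hUF.len ▸ hjlt) hconn
    rw [pvStep1, hg]
    refine ⟨k1, fun x y hx hy h => k3 x y (hUF.len ▸ hx) (hUF.len ▸ hy) h, ?_⟩
    intro j' hj'
    obtain rfl := (Option.some.injEq _ _).mp hj'
    exact k4

lemma pvB_step_spec {H : List (Int × Int)} {a b c d : Int} {cells : List (Int × Int)}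
    {P : Array Nat} (hUF : pvUF H a b c d cells P) (hnd : cells.Nodup)
    (hfree : ∀ k, k < cells.length → pvFreeP H a b c d (cells.getD k (0, 0)))
    {ci : (Int × Int) × Nat} (hi : ci.2 < cells.length)
    (hcell : cells.getD ci.2 (0, 0) = ci.1) :
    pvUF H a b c d cells (pvB_step (pvB_index cells) P ci) ∧
    (∀ x y, x < cells.length → y < cells.length →
      pvRootEq P x y → pvRootEq (pvB_step (pvB_index cells) P ci) x y) ∧
    (∀ nb ∈ [(ci.1.1, ci.1.2 + 1), (ci.1.1 + 1, ci.1.2)], ∀ j,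
      (pvB_index cells)[nb]? = some j →
      pvRootEq (pvB_step (pvB_index cells) P ci) ci.2 j) := by
  have hnb1 : ((ci.1.1, ci.1.2 + 1) : Int × Int) ∈ pvNbrs (cells.getD ci.2 (0, 0)) := by
    rw [hcell]; simp [pvNbrs]
  have hnb2 : ((ci.1.1 + 1, ci.1.2) : Int × Int) ∈ pvNbrs (cells.getD ci.2 (0, 0)) := by
    rw [hcell]; simp [pvNbrs]
  obtain ⟨m1, m2, m3⟩ := pvStep1_spec hUF hnd hfree hi hnb1
  obtain ⟨n1, n2, n3⟩ := pvStep1_spec m1 hnd hfree hi hnb2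
  rw [pvB_step_eq]
  refine ⟨n1, fun x y hx hy h => n2 x y hx hy (m2 x y hx hy h), ?_⟩
  intro nb hnb j hj
  rcases List.mem_cons.mp hnb with rfl | hnb'
  · refine n2 ci.2 j hi ?_ (m3 j hj)
    exact ((pv_index_get? hnd _ j).mp hj).1
  · rcases List.mem_cons.mp hnb' with rfl | h
    · exact n3 j hj
    · exact absurd h List.not_mem_nil

lemma pvB_fold_spec {H : List (Int × Int)} {a b c d : Int} {cells : List (Int × Int)}
    (hnd : cells.Nodup)
    (hfree : ∀ k, k < cells.length → pvFreeP H a b c d (cells.getD k (0, 0))) :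
    ∀ (l : List ((Int × Int) × Nat)) (P : Array Nat), pvUF H a b c d cells P →
    (∀ ci ∈ l, ci.2 < cells.length ∧ cells.getD ci.2 (0, 0) = ci.1) →
    pvUF H a b c d cells (l.foldl (pvB_step (pvB_index cells)) P) ∧
    (∀ x y, x < cells.length → y < cells.length →
      pvRootEq P x y → pvRootEq (l.foldl (pvB_step (pvB_index cells)) P) x y) ∧
    (∀ ci ∈ l, ∀ nb ∈ [(ci.1.1, ci.1.2 + 1), (ci.1.1 + 1, ci.1.2)], ∀ j,
      (pvB_index cells)[nb]? = some j →
      pvRootEq (l.foldl (pvB_step (pvB_index cells)) P) ci.2 j) := by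
  intro l
  induction l with
  | nil => intro P hUF _; exact ⟨hUF, fun x y _ _ h => h, by simp⟩
  | cons ci l ih =>
    intro P hUF hl
    have hci := hl ci List.mem_cons_self
    obtain ⟨s1, s2, s3⟩ := pvB_step_spec hUF hnd hfree hci.1 hci.2
    obtain ⟨f1, f2, f3⟩ := ih _ s1 (fun c hc => hl c (List.mem_cons_of_mem _ hc))
    rw [List.foldl_cons]
    refine ⟨f1, fun x y hx hy h => f2 x y hx hy (s2 x y hx hy h), ?_⟩
    intro c hc nb hnb j hj
    rcases List.mem_cons.mp hc with rfl | hc'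
    · refine f2 c.2 j hci.1 ((pv_index_get? hnd nb j).mp hj).1 (s3 nb hnb j hj)
    · exact f3 c hc' nb hnb j hj

-- ===== roots vs connectivity =====

lemma pv_conn_of_rootEq {H : List (Int × Int)} {a b c d : Int} {cells : List (Int × Int)}
    {P : Array Nat} (hUF : pvUF H a b c d cells P) {i j : Nat}
    (hi : i < cells.length) (hj : j < cells.length) (hij : pvRootEq P i j) :
    pvConn H a b c d (cells.getD i (0, 0)) (cells.getD j (0, 0)) := by
  have hi' : i < P.size := hUF.len ▸ hi
  have hj' : j < P.size := hUF.len ▸ hj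
  obtain ⟨-, -, -, k4⟩ := pvFind_spec hUF P.size i hi' hi'
  obtain ⟨-, -, -, l4⟩ := pvFind_spec hUF P.size j hj' hj'
  unfold pvRootEq at hij
  rw [hij] at k4
  exact pvConn_trans (pvConn_symm k4) l4

lemma pv_rootEq_of_conn {H : List (Int × Int)} {a b c d : Int} {cells : List (Int × Int)}
    {P : Array Nat} (hnd : cells.Nodup)
    (hadj : ∀ ci ∈ cells.zipIdx, ∀ nb ∈ [(ci.1.1, ci.1.2 + 1), (ci.1.1 + 1, ci.1.2)], ∀ j,
      (pvB_index cells)[nb]? = some j → pvRootEq P ci.2 j)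
    (hmem : ∀ q, q ∈ cells ↔ pvFreeP H a b c d q) :
    ∀ (p q : Int × Int), pvConn H a b c d p q →
    ∀ i j, i < cells.length → cells.getD i (0, 0) = p →
      j < cells.length → cells.getD j (0, 0) = q → pvRootEq P i j := by
  -- single adjacency, both orientations via the processed right/down pairs
  have hstep : ∀ k j, k < cells.length → j < cells.length →
      cells.getD j (0, 0) ∈ pvNbrs (cells.getD k (0, 0)) → pvRootEq P k j := by
    intro k j hk hj hnb
    have hcik : ((cells.getD k (0, 0), k) : (Int × Int) × Nat) ∈ cells.zipIdx :=
      pv_mem_zipIdx_of_lt hk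
    have hcij : ((cells.getD j (0, 0), j) : (Int × Int) × Nat) ∈ cells.zipIdx :=
      pv_mem_zipIdx_of_lt hj
    set p := cells.getD k (0, 0) with hp
    set q := cells.getD j (0, 0) with hq
    have hgq : (pvB_index cells)[q]? = some j := (pv_index_get? hnd q j).mpr ⟨hj, hq.symm⟩
    have hgp : (pvB_index cells)[p]? = some k := (pv_index_get? hnd p k).mpr ⟨hk, hp.symm⟩
    simp only [pvNbrs, List.mem_cons, List.not_mem_nil, or_false] at hnb
    rcases hnb with hc | hc | hc | hc
    · exact hadj _ hcik (p.1, p.2 + 1) (by simp) j (by rw [show ((p.1, p.2 + 1) : Int × Int) = q from hc ▸ rfl, hgq])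
    · -- q is left of p, so p is the right neighbor of q
      have hpq : ((q.1, q.2 + 1) : Int × Int) = p := by
        have h1 : q.1 = p.1 := by rw [hc]
        have h2 : q.2 = p.2 - 1 := by rw [hc]
        have : ((q.1, q.2 + 1) : Int × Int) = (p.1, p.2) := by rw [h1, h2]; norm_num
        exact this
      exact (hadj _ hcij (q.1, q.2 + 1) (by simp) k (by rw [hpq, hgp])).symm
    · -- q is above p, so p is the down neighbor of q
      have hpq : ((q.1 + 1, q.2) : Int × Int) = p := by
        have h1 : q.1 = p.1 - 1 := by rw [hc]
        have h2 : q.2 = p.2 := by rw [hc]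
        have : ((q.1 + 1, q.2) : Int × Int) = (p.1, p.2) := by rw [h1, h2]; norm_num
        exact this
      exact (hadj _ hcij (q.1 + 1, q.2) (by simp) k (by rw [hpq, hgp])).symm
    · exact hadj _ hcik (p.1 + 1, p.2) (by simp) j (by rw [show ((p.1 + 1, p.2) : Int × Int) = q from hc ▸ rfl, hgq])
  intro p q hconn
  induction hconn with
  | refl hf =>
    intro i j hi hpi hj hpj
    have : i = j := by
      have heq : cells[i] = cells[j] := by
        rw [← List.getD_eq_getElem cells (0, 0) hi, ← List.getD_eq_getElem cells (0, 0) hj,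
          hpi, hpj]
      exact (List.Nodup.getElem_inj_iff hnd).mp heq
    rw [this]
    rfl
  | step q' r' hc hn hf ih =>
    intro i j hi hpi hj hpj
    have hq'mem : q' ∈ cells := (hmem q').mpr (pvConn_free_right hc)
    obtain ⟨k, hk, hkq⟩ := List.mem_iff_getElem.mp hq'mem
    have hkq' : cells.getD k (0, 0) = q' := by rw [List.getD_eq_getElem _ _ hk, hkq]
    have h1 : pvRootEq P i k := ih i k hi hpi hk hkq'
    have h2 : pvRootEq P k j := hstep k j hk hj (by rw [hkq', hpj]; exact hn)
    exact h1.trans h2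

-- ===== edge_roots =====

lemma pv_edgeRoots_fold (a b c d : Int) (P : Array Nat) :
    ∀ (l : List ((Int × Int) × Nat)) (s : PySem.Set Nat) (x : Nat),
    (x ∈ l.foldl (fun s ci =>
        if ci.1.1 = a ∨ ci.1.1 = b ∨ ci.1.2 = c ∨ ci.1.2 = d
        then PySem.Set.add s (pvFind P P.size ci.2) else s) s)
    ↔ x ∈ s ∨ ∃ ci ∈ l, (ci.1.1 = a ∨ ci.1.1 = b ∨ ci.1.2 = c ∨ ci.1.2 = d) ∧
        pvFind P P.size ci.2 = x := by
  intro l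
  induction l with
  | nil => intro s x; simp
  | cons ci l ih =>
    intro s x
    rw [List.foldl_cons]
    by_cases hb : ci.1.1 = a ∨ ci.1.1 = b ∨ ci.1.2 = c ∨ ci.1.2 = d
    · rw [if_pos hb, ih, PySem.Set.mem_add]
      constructor
      · rintro ((h | h) | ⟨c, hc, hcb, hcf⟩)
        · exact Or.inl h
        · exact Or.inr ⟨ci, List.mem_cons_self, hb, h.symm⟩
        · exact Or.inr ⟨c, List.mem_cons_of_mem _ hc, hcb, hcf⟩
      · rintro (h | ⟨c, hc, hcb, hcf⟩)
        · exact Or.inl (Or.inl h)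
        · rcases List.mem_cons.mp hc with rfl | hc'
          · exact Or.inl (Or.inr hcf.symm)
          · exact Or.inr ⟨c, hc', hcb, hcf⟩
    · rw [if_neg hb, ih]
      constructor
      · rintro (h | ⟨c, hc, hcb, hcf⟩)
        · exact Or.inl h
        · exact Or.inr ⟨c, List.mem_cons_of_mem _ hc, hcb, hcf⟩
      · rintro (h | ⟨c, hc, hcb, hcf⟩)
        · exact Or.inl h
        · rcases List.mem_cons.mp hc with rfl | hc'
          · exact absurd hcb hb
          · exact Or.inr ⟨c, hc', hcb, hcf⟩

lemma pv_mem_edgeRoots (a b c d : Int) (P : Array Nat) (cells : List (Int × Int)) (x : Nat) :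
    x ∈ pvB_edgeRoots a b c d P cells ↔
    ∃ k, k < cells.length ∧
      ((cells.getD k (0, 0)).1 = a ∨ (cells.getD k (0, 0)).1 = b ∨
        (cells.getD k (0, 0)).2 = c ∨ (cells.getD k (0, 0)).2 = d) ∧
      pvFind P P.size k = x := by
  rw [pvB_edgeRoots, pv_edgeRoots_fold]
  constructor
  · rintro (h | ⟨ci, hci, hcb, hcf⟩)
    · exact absurd h (by simp [PySem.Set.empty])
    · obtain ⟨h1, h2⟩ := pv_zipIdx_prop hci
      exact ⟨ci.2, h1, by rw [h2]; exact hcb, hcf⟩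
  · rintro ⟨k, hk, hkb, hkf⟩
    exact Or.inr ⟨(cells.getD k (0, 0), k), pv_mem_zipIdx_of_lt hk, hkb, hkf⟩

-- ===== counting =====

lemma pv_countP_range (l : List (Int × Int)) (g : (Int × Int) → Bool) :
    (List.range l.length).countP (fun k => g (l.getD k (0, 0))) = l.countP g := by
  induction l using List.reverseRecOn with
  | nil => simp
  | append_singleton l x ih =>
    rw [List.length_append, List.length_singleton, List.range_succ, List.countP_append,
      List.countP_append]
    have h1 : (List.range l.length).countP (fun k => g ((l ++ [x]).getD k (0, 0)))
        = (List.range l.length).countP (fun k => g (l.getD k (0, 0))) :=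
      List.countP_congr (fun k hk => by
        rw [List.getD_append _ _ _ _ (List.mem_range.mp hk)])
    have h2 : ((l ++ [x]) : List (Int × Int)).getD l.length (0, 0) = x := by
      rw [List.getD_eq_getElem _ _ (by simp)]
      simp
    rw [h1, ih, List.countP_singleton, List.countP_singleton, h2]

-- ===== putting it together =====

-- the fully-unioned parent list of B (proof-side name for the fold in the port)
def pvPf (H : List (Int × Int)) (a b c d : Int) : Array Nat :=
  (pvB_cellsOf (PySem.Set.ofList H) a b c d).zipIdx.foldl
    (pvB_step (pvB_index (pvB_cellsOf (PySem.Set.ofList H) a b c d)))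
    (Array.range (pvB_cellsOf (PySem.Set.ofList H) a b c d).length)

lemma pv_final (H : List (Int × Int)) (a b c d : Int) (hab : a ≤ b) (hcd : c ≤ d) :
    (((pvA_state H a b c d).1.size : Nat) : Int)
      = (PySem.List.pyRange 0 ((pvB_cellsOf (PySem.Set.ofList H) a b c d).length : Int) 1).foldl
          (fun acc i =>
            if PySem.Set.contains
                (pvB_edgeRoots a b c d (pvPf H a b c d)
                  (pvB_cellsOf (PySem.Set.ofList H) a b c d))
                (pvFind (pvPf H a b c d) (pvPf H a b c d).size i.toNat)
            then acc + 1 else acc) 0 := by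
  set cells := pvB_cellsOf (PySem.Set.ofList H) a b c d with hcellsdef
  set P := pvPf H a b c d with hPdef
  set roots := pvB_edgeRoots a b c d P cells with hrootsdef
  have hnd : cells.Nodup := pv_cells_nodup
  have hmem : ∀ q, q ∈ cells ↔ pvFreeP H a b c d q := fun q => pv_mem_cells
  have hfree : ∀ k, k < cells.length → pvFreeP H a b c d (cells.getD k (0, 0)) := by
    intro k hk
    refine (hmem _).mp ?_
    rw [List.getD_eq_getElem _ _ hk]
    exact List.getElem_mem hk
  have hUF0 : pvUF H a b c d cells (Array.range cells.length) := pvUF_init hfree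
  have hPeq : P = cells.zipIdx.foldl (pvB_step (pvB_index cells)) (Array.range cells.length) := rfl
  obtain ⟨hUFf, -, hadj⟩ := pvB_fold_spec hnd hfree cells.zipIdx (Array.range cells.length)
    hUF0 (fun ci hci => pv_zipIdx_prop hci)
  rw [← hPeq] at hUFf hadj
  have hiff : ∀ i j, i < cells.length → j < cells.length →
      (pvRootEq P i j ↔ pvConn H a b c d (cells.getD i (0, 0)) (cells.getD j (0, 0))) := by
    intro i j hi hj
    exact ⟨pv_conn_of_rootEq hUFf hi hj,
      fun hc => pv_rootEq_of_conn hnd hadj hmem _ _ hc i j hi rfl hj rfl⟩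
  set g : Nat → Bool := fun k => PySem.Set.contains roots (pvFind P P.size k) with hgdef
  have hg : ∀ k, k < cells.length →
      (g k = true ↔ pvReach H a b c d (cells.getD k (0, 0))) := by
    intro k hk
    rw [hgdef]
    rw [PySem.Set.contains_iff, hrootsdef, pv_mem_edgeRoots, pvReach_iff_conn]
    constructor
    · rintro ⟨i, hi, hbnd, hfi⟩
      refine ⟨cells.getD i (0, 0), hfree i hi, hbnd, ?_⟩
      exact (hiff i k hi hk).mp hfi
    · rintro ⟨s, hsf, hsb, hconn⟩
      obtain ⟨i, hi, hse⟩ := List.mem_iff_getElem.mp ((hmem s).mpr hsf)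
      have hsd : cells.getD i (0, 0) = s := by rw [List.getD_eq_getElem _ _ hi, hse]
      refine ⟨i, hi, by rw [hsd]; exact hsb, ?_⟩
      exact (hiff i k hi hk).mpr (by rw [hsd]; exact hconn)
  set gB : (Int × Int) → Bool := fun p => ((pvB_index cells)[p]?).elim false g with hgBdef
  have hgB : ∀ k, k < cells.length → gB (cells.getD k (0, 0)) = g k := by
    intro k hk
    have : (pvB_index cells)[cells.getD k (0, 0)]? = some k :=
      (pv_index_get? hnd _ k).mpr ⟨hk, rfl⟩
    rw [hgBdef]
    simp only [this, Option.elim_some]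
  have hfilter : ∀ p, (p ∈ cells.filter gB ↔ pvReach H a b c d p) := by
    intro p
    rw [List.mem_filter]
    constructor
    · rintro ⟨hpc, hpb⟩
      obtain ⟨i, hi, hse⟩ := List.mem_iff_getElem.mp hpc
      have hsd : cells.getD i (0, 0) = p := by rw [List.getD_eq_getElem _ _ hi, hse]
      rw [← hsd]
      refine (hg i hi).mp ?_
      rw [← hgB i hi, hsd]
      exact hpb
    · intro hr
      have hpc : p ∈ cells := (hmem p).mpr (pvReach_free hr)
      obtain ⟨i, hi, hse⟩ := List.mem_iff_getElem.mp hpc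
      have hsd : cells.getD i (0, 0) = p := by rw [List.getD_eq_getElem _ _ hi, hse]
      refine ⟨hpc, ?_⟩
      rw [← hsd, hgB i hi]
      exact (hg i hi).mpr (by rw [hsd]; exact hr)
  have hAmem := pvA_state_char H a b c d hab hcd
  have hsz : (pvA_state H a b c d).1.size = (cells.filter gB).length := by
    rw [← Std.HashSet.length_toList]
    refine List.Perm.length_eq ?_
    refine (List.perm_ext_iff_of_nodup (pv_hs_nodup_toList _) (hnd.filter gB)).mpr ?_
    intro p
    rw [Std.HashSet.mem_toList, hAmem p, hfilter p]
  have hcnt : (cells.filter gB).length = (List.range cells.length).countP g := by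
    rw [← List.countP_eq_length_filter, ← pv_countP_range cells gB]
    exact List.countP_congr (fun k hk => by rw [hgB k (List.mem_range.mp hk)])
  have hB : (PySem.List.pyRange 0 (cells.length : Int) 1).foldl
      (fun acc i => if PySem.Set.contains roots (pvFind P P.size i.toNat)
        then acc + 1 else acc) 0
      = (((List.range cells.length).countP g : Nat) : Int) := by
    rw [PySem.List.pyRange_zero_natCast cells.length, PySem.List.foldl_count_if, zero_add,
      List.countP_map]
    congr 1
  rw [hB, hsz, hcnt]
-- ===== VERDICT (by name: the statement is the Claim_ definition above) =====
theorem count_empties_at_edge_spec : Claim_equal_count_empties_at_edge := by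
  intro H _ hpre
  unfold Spec_count_empties_at_edge count_empties_at_edge count_empties_at_edge_alt pvA_minMax
  have hys : H.map (fun p => p.1) ≠ [] := by simpa using hpre
  have hxs : H.map (fun p => p.2) ≠ [] := by simpa using hpre
  exact pv_final H _ _ _ _ (pv_minmax_le _ hys) (pv_minmax_le _ hxs)
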